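-- pv_equiv track=rewrite | github.com/bmenrigh/aoc_2024 | 21/solve_a.py | solve_code
-- ===== SOURCE A (Python) =====
-- def nums_code_to_coords(code):
--
--     ncoords = {'7': (0, 0), '8': (1, 0), '9': (2, 0),
--                '4': (0, 1), '5': (1, 1), '6': (2, 1),
--                '1': (0, 2), '2': (1, 2), '3': (2, 2),
--                ' ': (0, 3), '0': (1, 3), 'A': (2, 3)}
--
--     return [ncoords[c] for c in code]
--
-- def arrows_code_to_coords(code):
--
--     acoords = {' ': (0, 0), '^': (1, 0), 'A': (2, 0),
--                '<': (0, 1), 'v': (1, 1), '>': (2, 1)}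
--
--     return [acoords[c] for c in code]
--
-- def coords_to_arrows(coords, cp):
--
--     arrows = []
--
--     for gp in coords:
--
--         while True:
--
--             if cp == gp:
--                 arrows.append('A')
--                 break
--
--             # direction priority >^v< (right, up, down, left)
--
--             # > / right
--             if cp[0] < gp[0]:
--                 cp = (cp[0] + 1, cp[1])
--                 arrows.append('>')
--                 continue
--
--             # ^ / up
--             if cp[1] > gp[1]:
--                 cp = (cp[0], cp[1] - 1)
--                 arrows.append('^')
--                 continue
--
--             # v / up
--             if cp[1] < gp[1]:
--                 cp = (cp[0], cp[1] + 1)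
--                 arrows.append('v')
--                 continue
--
--             # > / right
--             if cp[0] > gp[0]:
--                 cp = (cp[0] - 1, cp[1])
--                 arrows.append('<')
--                 continue
--
--     return arrows
--
-- def solve_code(code):
--     coords = nums_code_to_coords(code)
--     arrows = coords_to_arrows(coords, (2, 3))
--
--     astr = "".join(arrows)
--     for i in range(2):
--         coords = arrows_code_to_coords(astr)
--         arrows = coords_to_arrows(coords, (2, 0))
--         astr = "".join(arrows)
--
--     return astr
-- ===== SOURCE B (Python) =====
-- def solve_code(code):
--     ncoords = {'7': (0, 0), '8': (1, 0), '9': (2, 0),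
--                '4': (0, 1), '5': (1, 1), '6': (2, 1),
--                '1': (0, 2), '2': (1, 2), '3': (2, 2),
--                ' ': (0, 3), '0': (1, 3), 'A': (2, 3)}
--     acoords = {' ': (0, 0), '^': (1, 0), 'A': (2, 0),
--                '<': (0, 1), 'v': (1, 1), '>': (2, 1)}
--
--     def expand(coords_map, s, cp):
--         parts = []
--         for ch in s:
--             gp = coords_map[ch]
--             dx = gp[0] - cp[0]
--             dy = gp[1] - cp[1]
--             parts.append('>' * max(dx, 0) + '^' * max(-dy, 0)
--                          + 'v' * max(dy, 0) + '<' * max(-dx, 0) + 'A')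
--             cp = gp
--         return ''.join(parts)
--
--     s = expand(ncoords, code, (2, 3))
--     for _ in range(2):
--         s = expand(acoords, s, (2, 0))
--     return s
-- ===== Notes on version B (the rewrite author's own statement) =====
-- stated objective: simpler
-- what changed: The per-target step-by-step greedy while-loop walk is replaced by closed-form delta arithmetic: each arrow run's length is computed directly from the coordinate difference (right, up, down, left, then the press key), and the separate coords-list pass is fused into one expand pass.
-- outside the precondition, e.g. on solve_code('>'): A raises KeyError, B raises KeyError; on solve_code('^'): A raises KeyError, B raises KeyError; on solve_code('v'): A raises KeyError, B raises KeyError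
import Mathlib
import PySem

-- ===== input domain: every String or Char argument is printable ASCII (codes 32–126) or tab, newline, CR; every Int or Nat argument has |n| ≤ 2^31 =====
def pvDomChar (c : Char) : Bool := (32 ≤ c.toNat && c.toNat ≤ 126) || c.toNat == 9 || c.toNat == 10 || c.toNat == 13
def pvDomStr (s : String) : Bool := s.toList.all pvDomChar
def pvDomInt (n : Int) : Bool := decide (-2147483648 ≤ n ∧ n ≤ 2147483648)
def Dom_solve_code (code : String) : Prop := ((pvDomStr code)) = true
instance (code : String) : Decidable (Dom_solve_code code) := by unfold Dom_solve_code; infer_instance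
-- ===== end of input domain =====

-- B replaces A's one-key-at-a-time greedy while-walk by closed-form delta arithmetic
-- ('>'*max(dx,0)+'^'*max(-dy,0)+'v'*max(dy,0)+'<'*max(-dx,0)+'A' per target), fusing the
-- coords list away; objective: simpler. Return-value equivalence only.

-- ===== PORT A =====
def pvNcoords : PySem.Dict Char (Int × Int) := PySem.Dict.ofList
  [('7', (0, 0)), ('8', (1, 0)), ('9', (2, 0)),
   ('4', (0, 1)), ('5', (1, 1)), ('6', (2, 1)),
   ('1', (0, 2)), ('2', (1, 2)), ('3', (2, 2)),
   (' ', (0, 3)), ('0', (1, 3)), ('A', (2, 3))]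

def pvAcoords : PySem.Dict Char (Int × Int) := PySem.Dict.ofList
  [(' ', (0, 0)), ('^', (1, 0)), ('A', (2, 0)),
   ('<', (0, 1)), ('v', (1, 1)), ('>', (2, 1))]

-- [m[c] for c in s]; none = KeyError (excluded by Pre_)
def pvLookAll (m : PySem.Dict Char (Int × Int)) : List Char → Option (List (Int × Int))
  | [] => some []
  | c :: rest =>
    match PySem.Dict.get? m c with
    | none => none
    | some p => (pvLookAll m rest).map (p :: ·)

def nums_code_to_coords (code : String) : Option (List (Int × Int)) :=
  pvLookAll pvNcoords code.toList

def arrows_code_to_coords (code : String) : Option (List (Int × Int)) :=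
  pvLookAll pvAcoords code.toList

-- A's inner 'while True' greedy single-step walk from cp to gp
def pvWalk (cp gp : Int × Int) : List Char :=
  if cp = gp then ['A']
  else if cp.1 < gp.1 then '>' :: pvWalk (cp.1 + 1, cp.2) gp
  else if cp.2 > gp.2 then '^' :: pvWalk (cp.1, cp.2 - 1) gp
  else if cp.2 < gp.2 then 'v' :: pvWalk (cp.1, cp.2 + 1) gp
  else '<' :: pvWalk (cp.1 - 1, cp.2) gp
termination_by ((gp.1 - cp.1).natAbs + (gp.2 - cp.2).natAbs)
decreasing_by
  · omega
  · omega
  · omega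
  · rcases cp with ⟨a, b⟩; rcases gp with ⟨c, d⟩
    simp_all [Prod.ext_iff]; omega

def coords_to_arrows : List (Int × Int) → Int × Int → List Char
  | [], _ => []
  | gp :: rest, cp => pvWalk cp gp ++ coords_to_arrows rest gp

def solve_code (code : String) : String :=
  match nums_code_to_coords code with
  | none => ""   -- A raises KeyError here; outside Pre_
  | some coords =>
    let astr := String.ofList (coords_to_arrows coords (2, 3))
    (List.range 2).foldl (fun astr _ =>
      match arrows_code_to_coords astr with
      | none => ""   -- unreachable: arrow output chars are all acoords keys
      | some coords => String.ofList (coords_to_arrows coords (2, 0))) astr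

-- ===== PORT B =====
-- closed-form move string for one target
def pvMove (cp gp : Int × Int) : List Char :=
  let dx := gp.1 - cp.1
  let dy := gp.2 - cp.2
  List.replicate (max dx 0).toNat '>' ++ List.replicate (max (-dy) 0).toNat '^' ++
  List.replicate (max dy 0).toNat 'v' ++ List.replicate (max (-dx) 0).toNat '<' ++ ['A']

-- B's expand(coords_map, s, cp); none = KeyError (excluded by Pre_)
def pvExpand (m : PySem.Dict Char (Int × Int)) : List Char → Int × Int → Option (List Char)
  | [], _ => some []
  | ch :: rest, cp =>
    match PySem.Dict.get? m ch with
    | none => none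
    | some gp => (pvExpand m rest gp).map (pvMove cp gp ++ ·)

def solve_code_alt (code : String) : String :=
  match pvExpand pvNcoords code.toList (2, 3) with
  | none => ""
  | some s =>
    (List.range 2).foldl (fun s _ =>
      match pvExpand pvAcoords s.toList (2, 0) with
      | none => ""
      | some t => String.ofList t) (String.ofList s)

-- ===== PRECONDITION & SPEC =====
-- A raises KeyError on any character outside the numeric keypad; those inputs are excluded.
def Pre_solve_code (code : String) : Prop :=
  code.toList.all (fun c => c ∈ ['0','1','2','3','4','5','6','7','8','9',' ','A']) = true
instance (code : String) : Decidable (Pre_solve_code code) := by unfold Pre_solve_code; infer_instance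

def pvWitness_solve_code : String := "029A"

def Spec_solve_code (code : String) (out : String) : Prop := out = solve_code_alt code
instance (code : String) (out : String) : Decidable (Spec_solve_code code out) := by unfold Spec_solve_code; infer_instance

-- ===== CLAIM (what is proved, stated in full; the proofs are below) =====
def Claim_equal_solve_code : Prop := ∀ (code : String), Dom_solve_code code → Pre_solve_code code → Spec_solve_code code (solve_code code)

-- ===== LEMMAS AND PROOFS =====

-- the greedy step walk equals the closed-form move string
theorem pvWalk_eq_pvMove (cp gp : Int × Int) : pvWalk cp gp = pvMove cp gp := by
  rcases cp with ⟨a, b⟩; rcases gp with ⟨c, d⟩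
  rw [pvWalk]
  split_ifs with h1 h2 h3 h4
  · simp only [Prod.mk.injEq] at h1
    simp [pvMove, h1.1, h1.2]
  · simp only at h2
    rw [pvWalk_eq_pvMove]
    have e1 : (max (c - a) 0).toNat = (max (c - (a + 1)) 0).toNat + 1 := by omega
    simp only [pvMove, e1, List.replicate_succ]
    simp
    omega
  · simp only at h2 h3
    rw [pvWalk_eq_pvMove]
    have e1 : (max (c - a) 0).toNat = 0 := by omega
    have e2 : (max (-(d - b)) 0).toNat = (max (-(d - (b - 1))) 0).toNat + 1 := by omega
    have e3 : (max (d - b) 0).toNat = 0 := by omega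
    have e4 : (max (d - (b - 1)) 0).toNat = 0 := by omega
    simp only [pvMove, e1, e2, e3, e4, List.replicate_succ, List.replicate_zero]
    simp
  · simp only at h2 h3 h4
    rw [pvWalk_eq_pvMove]
    have e1 : (max (c - a) 0).toNat = 0 := by omega
    have e2 : (max (-(d - b)) 0).toNat = 0 := by omega
    have e2' : (max (-(d - (b + 1))) 0).toNat = 0 := by omega
    have e3 : (max (d - b) 0).toNat = (max (d - (b + 1)) 0).toNat + 1 := by omega
    simp only [pvMove, e1, e2, e2', e3, List.replicate_succ, List.replicate_zero]
    simp
  · simp only [Prod.mk.injEq, not_and] at h1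
    simp only at h2 h3 h4
    have hb : b = d := by omega
    have ha : c < a := by
      rcases lt_or_eq_of_le (not_lt.mp h2) with h' | h'
      · exact h'
      · exact absurd hb (h1 h'.symm)
    rw [pvWalk_eq_pvMove]
    have e1 : (max (c - a) 0).toNat = 0 := by omega
    have e1' : (max (c - (a - 1)) 0).toNat = 0 := by omega
    have e2 : (max (-(d - b)) 0).toNat = 0 := by omega
    have e3 : (max (d - b) 0).toNat = 0 := by omega
    have e4 : (max (-(c - a)) 0).toNat = (max (-(c - (a - 1))) 0).toNat + 1 := by omega
    simp only [pvMove, e1, e1', e2, e3, e4, List.replicate_succ, List.replicate_zero]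
    simp
termination_by ((gp.1 - cp.1).natAbs + (gp.2 - cp.2).natAbs)
decreasing_by all_goals omega

-- B's fused expand equals "look everything up, then run A's walk"
theorem pvExpand_eq (m : PySem.Dict Char (Int × Int)) (s : List Char) (cp : Int × Int) :
    pvExpand m s cp = (pvLookAll m s).map (fun cs => coords_to_arrows cs cp) := by
  induction s generalizing cp with
  | nil => simp [pvExpand, pvLookAll, coords_to_arrows]
  | cons c rest ih =>
    simp only [pvExpand, pvLookAll]
    cases PySem.Dict.get? m c with
    | none => simp
    | some gp =>
      simp only [ih gp]
      cases pvLookAll m rest with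
      | none => simp
      | some cs => simp [coords_to_arrows, pvWalk_eq_pvMove]

-- ===== VERDICT (by name: the statement is the Claim_ definition above) =====
theorem solve_code_spec : Claim_equal_solve_code := by
  intro code _ _
  unfold Spec_solve_code solve_code solve_code_alt nums_code_to_coords arrows_code_to_coords
  simp only [pvExpand_eq]
  cases pvLookAll pvNcoords code.toList with
  | none => rfl
  | some cs =>
    show (List.range 2).foldl _ _ = (List.range 2).foldl _ _
    congr 1
    funext astr _
    cases pvLookAll pvAcoords astr.toList with
    | none => rfl
    | some cs' => rfl
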